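-- pv_equiv track=rewrite | github.com/matiespinel/Tecno_Digital_Notas | sfsdf.py | simBP
-- ===== SOURCE A (Python) =====
-- def simBP(n, m):
--     bin_n = bin(n)[2:]
--     bin_m = bin(m)[2:]
--     count = 0
--     for i in range(min(len(bin_n), len(bin_m))):
--         if bin_n[i] == bin_m[i]:
--             count += 1
--         else:
--             break
--     return count
-- ===== SOURCE B (Python) =====
-- def simBP(n, m):
--     bn = bin(n)[2:]
--     bm = bin(m)[2:]
--     lo, hi = 0, min(len(bn), len(bm))
--     while lo < hi:
--         mid = (lo + hi + 1) // 2
--         if bn[:mid] == bm[:mid]: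
--             lo = mid
--         else:
--             hi = mid - 1
--     return lo
-- ===== Notes on version B (the rewrite author's own statement) =====
-- stated objective: alternative
-- what changed: A scans the two binary strings left to right counting matches until the first mismatch; B instead binary-searches for the largest k with bin(n)[2:][:k] == bin(m)[2:][:k], maintaining a lo/hi interval over the prefix length.
import Mathlib
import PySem

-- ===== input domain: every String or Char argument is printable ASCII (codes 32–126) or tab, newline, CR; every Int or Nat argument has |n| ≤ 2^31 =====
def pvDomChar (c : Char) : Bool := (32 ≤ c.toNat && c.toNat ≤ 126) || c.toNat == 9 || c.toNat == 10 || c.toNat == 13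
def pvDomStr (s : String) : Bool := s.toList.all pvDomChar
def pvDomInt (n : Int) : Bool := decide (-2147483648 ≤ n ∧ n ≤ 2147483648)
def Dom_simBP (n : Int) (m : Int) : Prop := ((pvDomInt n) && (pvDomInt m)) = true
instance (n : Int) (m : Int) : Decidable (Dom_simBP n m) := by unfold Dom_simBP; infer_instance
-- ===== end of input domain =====

-- B replaces A's linear first-mismatch scan over the two binary strings by a binary search
-- on the common-prefix length (alternative decomposition, same exact return value).


-- ===== PORT A =====
-- bin(x)[2:] as a list of characters (shared by both ports, exactly as both Pythons compute it)
def pvBinTail (x : Int) : List Char :=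
  PySem.List.slice (PySem.Int.toBinChars0b x) (some 2) none

-- the for-loop of A: i runs over range(min(len bn, len bm)) (fuel = remaining iterations),
-- count accumulates, break on first mismatch returns count
def simBPLoop (bn bm : List Char) : Nat → Nat → Int → Int
  | 0, _, count => count
  | fuel + 1, i, count =>
      if bn.getD i ' ' = bm.getD i ' ' then simBPLoop bn bm fuel (i + 1) (count + 1)
      else count

def simBP (n : Int) (m : Int) : Int :=
  let bin_n := pvBinTail n
  let bin_m := pvBinTail m
  simBPLoop bin_n bin_m (min bin_n.length bin_m.length) 0 0

-- ===== PORT B =====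
-- the while-loop of B: binary search for the largest lo with bn[:lo] == bm[:lo];
-- fuel only makes the while loop structural (interval shrinks each iteration)
def simBPSearch (bn bm : List Char) : Nat → Nat → Nat → Nat
  | 0, lo, _ => lo
  | fuel + 1, lo, hi =>
      if lo < hi then
        let mid := (lo + hi + 1) / 2
        if bn.take mid = bm.take mid then simBPSearch bn bm fuel mid hi
        else simBPSearch bn bm fuel lo (mid - 1)
      else lo

def simBP_alt (n : Int) (m : Int) : Int :=
  let bn := pvBinTail n
  let bm := pvBinTail m
  let hi := min bn.length bm.length
  Int.ofNat (simBPSearch bn bm hi 0 hi)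

-- ===== PRECONDITION & SPEC =====
def Spec_simBP (n : Int) (m : Int) (out : Int) : Prop := out = simBP_alt n m
instance (n : Int) (m : Int) (out : Int) : Decidable (Spec_simBP n m out) := by unfold Spec_simBP; infer_instance

-- ===== CLAIM (what is proved, stated in full; the proofs are below) =====
def Claim_equal_simBP : Prop := ∀ (n : Int) (m : Int), Dom_simBP n m → Spec_simBP n m (simBP n m)

-- ===== LEMMAS AND PROOFS =====

-- length of the common prefix of two character lists
def cpl : List Char → List Char → Nat
  | a :: as, b :: bs => if a = b then cpl as bs + 1 else 0
  | _, _ => 0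

theorem cpl_nil_left (bm : List Char) : cpl [] bm = 0 := by cases bm <;> rfl

theorem cpl_nil_right (bn : List Char) : cpl bn [] = 0 := by cases bn <;> rfl

theorem cpl_le (bn bm : List Char) : cpl bn bm ≤ min bn.length bm.length := by
  induction bn generalizing bm with
  | nil => simp [cpl_nil_left]
  | cons a as ih =>
    cases bm with
    | nil => simp [cpl_nil_right]
    | cons b bs =>
      by_cases h : a = b
      · subst h
        have := ih bs
        simp only [cpl, List.length_cons, if_true]
        omega
      · simp [cpl, h]

theorem take_eq_iff_le_cpl (bn bm : List Char) (k : Nat)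
    (hk : k ≤ min bn.length bm.length) :
    (bn.take k = bm.take k) ↔ k ≤ cpl bn bm := by
  induction bn generalizing bm k with
  | nil =>
    have : k = 0 := by simp at hk; omega
    subst this; simp
  | cons a as ih =>
    cases bm with
    | nil =>
      have : k = 0 := by simp at hk; omega
      subst this; simp
    | cons b bs =>
      cases k with
      | zero => simp
      | succ k =>
        simp only [List.take_succ_cons, List.cons.injEq, cpl]
        by_cases h : a = b
        · subst h
          rw [if_pos rfl, ih bs k (by simp at hk ⊢; omega)]
          simp only [true_and]
          omega
        · rw [if_neg h]
          simp [h]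

-- A's loop counts exactly the common prefix length of the suffixes it still has to scan
theorem simBPLoop_eq (bn bm : List Char) :
    ∀ (fuel i : Nat) (count : Int), i + fuel = min bn.length bm.length →
      simBPLoop bn bm fuel i count = count + Int.ofNat (cpl (bn.drop i) (bm.drop i)) := by
  intro fuel
  induction fuel with
  | zero =>
    intro i count h
    rcases Nat.le_total bn.length bm.length with hle | hle
    · have : bn.length ≤ i := by omega
      rw [List.drop_eq_nil_of_le this, cpl_nil_left]
      simp [simBPLoop]
    · have : bm.length ≤ i := by omega
      rw [List.drop_eq_nil_of_le this, cpl_nil_right]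
      simp [simBPLoop]
  | succ fuel ih =>
    intro i count h
    have hin : i < bn.length := by omega
    have him : i < bm.length := by omega
    rw [List.drop_eq_getElem_cons hin, List.drop_eq_getElem_cons him]
    simp only [simBPLoop, List.getD_eq_getElem _ _ hin, List.getD_eq_getElem _ _ him, cpl]
    by_cases hc : bn[i] = bm[i]
    · rw [if_pos hc, if_pos hc, ih (i + 1) (count + 1) (by omega)]
      simp only [Int.ofNat_eq_natCast]
      push_cast
      omega
    · rw [if_neg hc, if_neg hc]
      simp

-- B's binary search converges to the common prefix length
theorem simBPSearch_eq (bn bm : List Char) :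
    ∀ (fuel lo hi : Nat), lo ≤ cpl bn bm → cpl bn bm ≤ hi →
      hi ≤ min bn.length bm.length → hi - lo ≤ fuel →
      simBPSearch bn bm fuel lo hi = cpl bn bm := by
  intro fuel
  induction fuel with
  | zero =>
    intro lo hi h1 h2 h3 h4
    have : lo = cpl bn bm := by omega
    simp [simBPSearch, this]
  | succ fuel ih =>
    intro lo hi h1 h2 h3 h4
    by_cases hlt : lo < hi
    · have hmid1 : lo + 1 ≤ (lo + hi + 1) / 2 := by omega
      have hmid2 : (lo + hi + 1) / 2 ≤ hi := by omega
      rw [simBPSearch, if_pos hlt]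
      simp only
      by_cases htk : bn.take ((lo + hi + 1) / 2) = bm.take ((lo + hi + 1) / 2)
      · rw [if_pos htk]
        have := (take_eq_iff_le_cpl bn bm _ (by omega)).mp htk
        exact ih _ _ this h2 h3 (by omega)
      · rw [if_neg htk]
        have : ¬ ((lo + hi + 1) / 2 ≤ cpl bn bm) :=
          fun hle => htk ((take_eq_iff_le_cpl bn bm _ (by omega)).mpr hle)
        exact ih _ _ h1 (by omega) (by omega) (by omega)
    · rw [simBPSearch, if_neg hlt]
      omega

-- ===== VERDICT (by name: the statement is the Claim_ definition above) =====
theorem simBP_spec : Claim_equal_simBP := by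
  intro n m _
  unfold Spec_simBP simBP simBP_alt
  simp only
  rw [simBPLoop_eq (pvBinTail n) (pvBinTail m) _ 0 0 (by omega)]
  rw [simBPSearch_eq (pvBinTail n) (pvBinTail m) _ 0 _ (Nat.zero_le _) (cpl_le _ _)
        (Nat.le_refl _) (by omega)]
  simp
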